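-- pv_equiv track=rewrite | github.com/mafuba8/adventofcode | 2025/day01/day01-2.py | rotate_dial
-- ===== SOURCE A (Python) =====
-- def rotate_dial(pos, instruction):
--     """Rotates the dial according to the instruction and counts how many times it hits zero."""
--     rot, num = instruction
--     zero_hits = 0
--     # Full rotations always give exactly one zero hit.
--     zero_hits += (num // 100)
--     # Handle the remainder.
--     for _ in range(num % 100):
--         match rot:
--             case 'R':
--                 pos = (pos + 1) % 100
--             case 'L':
--                 pos = (pos - 1) % 100
--         if pos == 0:
--             zero_hits += 1
--     return pos, zero_hits
-- ===== SOURCE B (Python) =====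
-- def rotate_dial(pos, instruction):
--     """Rotates the dial according to the instruction and counts how many times it hits zero."""
--     rot, num = instruction
--     full, rem = divmod(num, 100)
--     if rem == 0:
--         return pos, full
--     if rot == 'R':
--         t = (-pos) % 100
--         return (pos + rem) % 100, full + (1 if 0 < t <= rem else 0)
--     if rot == 'L':
--         t = pos % 100
--         return (pos - rem) % 100, full + (1 if 0 < t <= rem else 0)
--     return pos, full
-- ===== Notes on version B (the rewrite author's own statement) =====
-- stated objective: simpler
-- what changed: Replaces A's step-by-step remainder loop (up to 99 single-step rotations, checking for zero after each) with closed-form modular arithmetic: divmod(num,100), final position by one mod, and the single possible remainder zero hit decided by a range test on (-pos)%100 resp. pos%100; an unrecognised rotation letter leaves the dial untouched.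
-- intended difference: On instructions whose rotation letter is neither 'R' nor 'L', with pos == 0 and num % 100 != 0, A's default-less match leaves the dial stationary at zero yet counts a zero hit on every remainder tick, returning (0, num//100 + num%100); B returns (0, num//100), the intended value, since a dial that never moves past zero gains no extra hits. — e.g. on rotate_dial(0, ("X", 5)): A returns (0, 5), B returns (0, 0)
import Mathlib
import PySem

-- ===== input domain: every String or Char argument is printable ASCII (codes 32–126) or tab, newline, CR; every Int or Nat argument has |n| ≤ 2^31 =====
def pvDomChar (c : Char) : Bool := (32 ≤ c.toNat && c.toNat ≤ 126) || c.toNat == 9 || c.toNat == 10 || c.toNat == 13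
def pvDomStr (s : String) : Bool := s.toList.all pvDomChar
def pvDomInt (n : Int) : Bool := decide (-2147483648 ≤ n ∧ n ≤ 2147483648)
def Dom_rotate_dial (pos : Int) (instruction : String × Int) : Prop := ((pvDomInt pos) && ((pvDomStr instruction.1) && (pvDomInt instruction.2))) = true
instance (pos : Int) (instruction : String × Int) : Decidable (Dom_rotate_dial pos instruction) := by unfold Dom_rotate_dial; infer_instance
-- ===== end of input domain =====

-- B replaces A's step-by-step remainder loop with closed-form modular arithmetic (simpler, O(1) instead of up to 99 steps).

-- ===== PORT A =====
def rotate_dial (pos : Int) (instruction : String × Int) : Int × Int :=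
  let rot := instruction.1
  let num := instruction.2
  let zero_hits : Int := PySem.Int.floordiv num 100
  (List.range (PySem.Int.mod num 100).toNat).foldl
    (fun st _ =>
      let p := if rot == "R" then PySem.Int.mod (st.1 + 1) 100
               else if rot == "L" then PySem.Int.mod (st.1 - 1) 100
               else st.1
      (p, if p == 0 then st.2 + 1 else st.2))
    (pos, zero_hits)

-- ===== PORT B =====
def rotate_dial_alt (pos : Int) (instruction : String × Int) : Int × Int :=
  let rot := instruction.1
  let num := instruction.2
  let full := PySem.Int.floordiv num 100
  let rem := PySem.Int.mod num 100
  if rem == 0 then (pos, full)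
  else if rot == "R" then
    let t := PySem.Int.mod (-pos) 100
    (PySem.Int.mod (pos + rem) 100, full + (if 0 < t ∧ t ≤ rem then 1 else 0))
  else if rot == "L" then
    let t := PySem.Int.mod pos 100
    (PySem.Int.mod (pos - rem) 100, full + (if 0 < t ∧ t ≤ rem then 1 else 0))
  else (pos, full)

-- ===== PRECONDITION & SPEC =====
-- On instructions whose rotation letter is neither 'R' nor 'L', with pos == 0 and num % 100 ≠ 0,
-- A's default-less match leaves the dial stationary at zero yet counts a zero hit on every remainder
-- tick, returning (0, num//100 + num%100); B returns (0, num//100), the intended value, since a dial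
-- that never moves past zero gains no extra hits.
def D_rotate_dial (pos : Int) (instruction : String × Int) : Prop :=
  instruction.1 ≠ "R" ∧ instruction.1 ≠ "L" ∧ pos = 0 ∧ instruction.2 % 100 ≠ 0
instance (pos : Int) (instruction : String × Int) : Decidable (D_rotate_dial pos instruction) := by
  unfold D_rotate_dial; infer_instance

def Spec_rotate_dial (pos : Int) (instruction : String × Int) (out : Int × Int) : Prop :=
  ¬ D_rotate_dial pos instruction → out = rotate_dial_alt pos instruction
instance (pos : Int) (instruction : String × Int) (out : Int × Int) : Decidable (Spec_rotate_dial pos instruction out) := by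
  unfold Spec_rotate_dial; infer_instance

def pvDiffWitness_rotate_dial : Int × (String × Int) := (0, ("X", 5))
def pvDiffWitnessOut_rotate_dial : (Int × Int) × (Int × Int) := ((0, 5), (0, 0))

-- ===== CLAIM (what is proved, stated in full; the proofs are below) =====
def Claim_unchanged_rotate_dial : Prop := ∀ (pos : Int) (instruction : String × Int), Dom_rotate_dial pos instruction → Spec_rotate_dial pos instruction (rotate_dial pos instruction)
def Claim_changed_rotate_dial : Prop := Dom_rotate_dial (pvDiffWitness_rotate_dial.1) (pvDiffWitness_rotate_dial.2) ∧ D_rotate_dial (pvDiffWitness_rotate_dial.1) (pvDiffWitness_rotate_dial.2) ∧ rotate_dial (pvDiffWitness_rotate_dial.1) (pvDiffWitness_rotate_dial.2) = pvDiffWitnessOut_rotate_dial.1 ∧ rotate_dial_alt (pvDiffWitness_rotate_dial.1) (pvDiffWitness_rotate_dial.2) = pvDiffWitnessOut_rotate_dial.2 ∧ pvDiffWitnessOut_rotate_dial.1 ≠ pvDiffWitnessOut_rotate_dial.2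
def Claim_exact_rotate_dial : Prop := ∀ (pos : Int) (instruction : String × Int), Dom_rotate_dial pos instruction → D_rotate_dial pos instruction → rotate_dial pos instruction ≠ rotate_dial_alt pos instruction

-- ===== LEMMAS AND PROOFS =====

theorem pv_mod_emod (a : Int) : PySem.Int.mod a 100 = a % 100 :=
  PySem.Int.mod_eq_emod_of_pos (by norm_num)

-- closed form of A's loop when rot = 'R'
theorem pv_foldR (k : Nat) (hk1 : 1 ≤ k) (hk : k ≤ 99) (p z : Int) :
    (List.range k).foldl
      (fun st (_ : Nat) =>
        ((st.1 + 1) % 100, if (st.1 + 1) % 100 = 0 then st.2 + 1 else st.2)) (p, z)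
    = ((p + k) % 100,
       z + (if 0 < (-p) % 100 ∧ (-p) % 100 ≤ (k : Int) then 1 else 0)) := by
  induction k with
  | zero => omega
  | succ n ih =>
    rw [List.range_succ, List.foldl_append]
    by_cases hn : n = 0
    · subst hn
      simp only [List.range_zero, List.foldl_nil, List.foldl_cons, Prod.mk.injEq]
      refine ⟨by push_cast; ring_nf, ?_⟩
      split_ifs with h1 h2 h2 <;> push_cast at * <;> omega
    · rw [ih (by omega) (by omega)]
      simp only [List.foldl_cons, List.foldl_nil, Prod.mk.injEq]
      refine ⟨by push_cast; omega, ?_⟩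
      split_ifs with h1 h2 h2 <;> push_cast at * <;> omega

-- closed form of A's loop when rot = 'L'
theorem pv_foldL (k : Nat) (hk1 : 1 ≤ k) (hk : k ≤ 99) (p z : Int) :
    (List.range k).foldl
      (fun st (_ : Nat) =>
        ((st.1 - 1) % 100, if (st.1 - 1) % 100 = 0 then st.2 + 1 else st.2)) (p, z)
    = ((p - k) % 100,
       z + (if 0 < p % 100 ∧ p % 100 ≤ (k : Int) then 1 else 0)) := by
  induction k with
  | zero => omega
  | succ n ih =>
    rw [List.range_succ, List.foldl_append]
    by_cases hn : n = 0
    · subst hn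
      simp only [List.range_zero, List.foldl_nil, List.foldl_cons, Prod.mk.injEq]
      refine ⟨by push_cast; ring_nf, ?_⟩
      split_ifs with h1 h2 h2 <;> push_cast at * <;> omega
    · rw [ih (by omega) (by omega)]
      simp only [List.foldl_cons, List.foldl_nil, Prod.mk.injEq]
      refine ⟨by push_cast; omega, ?_⟩
      split_ifs with h1 h2 h2 <;> push_cast at * <;> omega

-- closed form of A's loop when rot is neither 'R' nor 'L': pos never moves
theorem pv_foldN (k : Nat) (p z : Int) :
    (List.range k).foldl
      (fun st (_ : Nat) => (st.1, if st.1 = 0 then st.2 + 1 else st.2)) (p, z)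
    = (p, z + (if p = 0 then (k : Int) else 0)) := by
  induction k with
  | zero => simp
  | succ n ih =>
    rw [List.range_succ, List.foldl_append, ih]
    simp only [List.foldl_cons, List.foldl_nil, Prod.mk.injEq]
    split_ifs <;> refine ⟨trivial, by push_cast; omega⟩

-- A's result in closed form on every input
theorem pv_A_closed (pos : Int) (rot : String) (num : Int) :
    rotate_dial pos (rot, num) =
      if num % 100 = 0 then (pos, num / 100)
      else if rot = "R" then
        ((pos + num % 100) % 100,
         num / 100 + (if 0 < (-pos) % 100 ∧ (-pos) % 100 ≤ num % 100 then 1 else 0))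
      else if rot = "L" then
        ((pos - num % 100) % 100,
         num / 100 + (if 0 < pos % 100 ∧ pos % 100 ≤ num % 100 then 1 else 0))
      else (pos, num / 100 + (if pos = 0 then num % 100 else 0)) := by
  unfold rotate_dial
  have hb : (0 : Int) ≤ num % 100 ∧ num % 100 < 100 :=
    ⟨Int.emod_nonneg _ (by norm_num), Int.emod_lt_of_pos _ (by norm_num)⟩
  have hfd : PySem.Int.floordiv num 100 = num / 100 :=
    PySem.Int.floordiv_eq_ediv_of_pos (by norm_num)
  by_cases h0 : num % 100 = 0
  · have hz : (PySem.Int.mod num 100).toNat = 0 := by rw [pv_mod_emod]; omega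
    simp [h0]
  · have hk1 : 1 ≤ (PySem.Int.mod num 100).toNat := by rw [pv_mod_emod]; omega
    have hk : (PySem.Int.mod num 100).toNat ≤ 99 := by rw [pv_mod_emod]; omega
    have hcast : (((PySem.Int.mod num 100).toNat : Int)) = num % 100 := by
      rw [pv_mod_emod]; omega
    by_cases hR : rot = "R"
    · rw [pv_mod_emod] at hk1 hk hcast
      simp only [hR, beq_self_eq_true, if_true, if_neg h0, beq_iff_eq, pv_mod_emod, hfd]
      rw [pv_foldR _ hk1 hk, hcast]
    · by_cases hL : rot = "L"
      · rw [pv_mod_emod] at hk1 hk hcast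
        subst hL
        have hLR : (("L" : String) = "R") = False := by simp
        simp only [beq_iff_eq, hLR, if_false, if_neg h0, pv_mod_emod, hfd, if_true]
        rw [pv_foldL _ hk1 hk, hcast]
      · have hR' : (rot == "R") = false := by simpa using hR
        have hL' : (rot == "L") = false := by simpa using hL
        rw [pv_mod_emod] at hcast
        simp only [hR', hL', if_false, Bool.false_eq_true, if_neg h0, if_neg hR,
          if_neg hL, pv_mod_emod, hfd, beq_iff_eq]
        rw [pv_foldN, hcast]

-- ===== VERDICT (by name: the statement is the Claim_ definition above) =====
theorem rotate_dial_spec : Claim_unchanged_rotate_dial := by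
  intro pos instruction _ hD
  obtain ⟨rot, num⟩ := instruction
  unfold D_rotate_dial at hD
  push Not at hD
  show rotate_dial pos (rot, num) = rotate_dial_alt pos (rot, num)
  rw [pv_A_closed]
  unfold rotate_dial_alt
  have hfd : PySem.Int.floordiv num 100 = num / 100 :=
    PySem.Int.floordiv_eq_ediv_of_pos (by norm_num)
  simp only [pv_mod_emod, hfd, beq_iff_eq]
  by_cases h0 : num % 100 = 0
  · simp [h0]
  · by_cases hR : rot = "R"
    · simp [h0, hR]
    · by_cases hL : rot = "L"
      · simp [h0, hL]
      · have hp : pos ≠ 0 := fun hp0 => h0 (hD hR hL hp0)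
        simp [h0, hR, hL, hp]

theorem rotate_dial_changed : Claim_changed_rotate_dial := by
  unfold Claim_changed_rotate_dial; decide

theorem rotate_dial_tight : Claim_exact_rotate_dial := by
  intro pos instruction _ hD
  obtain ⟨rot, num⟩ := instruction
  obtain ⟨hR, hL, hp, hm⟩ := hD
  simp only at hR hL hp hm
  subst hp
  rw [pv_A_closed]
  unfold rotate_dial_alt
  have hfd : PySem.Int.floordiv num 100 = num / 100 :=
    PySem.Int.floordiv_eq_ediv_of_pos (by norm_num)
  simp only [pv_mod_emod, hfd, beq_iff_eq, if_neg hm, if_neg hR, if_neg hL]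
  intro hEq
  have h2 := congrArg Prod.snd hEq
  simp at h2
  have hb : 0 < num % 100 := by
    have := Int.emod_nonneg num (show (100:Int) ≠ 0 by norm_num)
    omega
  omega
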